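-- pv_equiv track=rewrite | github.com/zeomzzz/python-algorithm-study | programmers/Lv.3/12987.py | solution
-- ===== SOURCE A (Python) =====
-- def solution(A, B):
--     answer = 0
--
--     A.sort(reverse = True)
--     B.sort(reverse = True)
--
--     for a in A :
--         if len(B) == 0 : break
--
--         if B[0] > a :
--             B.pop(0)
--             answer += 1
--
--     return answer
-- ===== SOURCE B (Python) =====
-- def solution(A, B):
--     sa = sorted(A, reverse=True)
--     sb = sorted(B, reverse=True)
--     j = 0
--     for a in sa:
--         if j < len(sb) and sb[j] > a:
--             j += 1
--     return j
-- ===== Notes on version B (the rewrite author's own statement) =====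
-- stated objective: faster
-- what changed: Replace the O(n) B.pop(0) per matched element (and the break/answer accumulator) with an advancing index j over the sorted list, returning j directly; B also does not mutate its arguments while A sorts them in place.
import Mathlib
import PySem

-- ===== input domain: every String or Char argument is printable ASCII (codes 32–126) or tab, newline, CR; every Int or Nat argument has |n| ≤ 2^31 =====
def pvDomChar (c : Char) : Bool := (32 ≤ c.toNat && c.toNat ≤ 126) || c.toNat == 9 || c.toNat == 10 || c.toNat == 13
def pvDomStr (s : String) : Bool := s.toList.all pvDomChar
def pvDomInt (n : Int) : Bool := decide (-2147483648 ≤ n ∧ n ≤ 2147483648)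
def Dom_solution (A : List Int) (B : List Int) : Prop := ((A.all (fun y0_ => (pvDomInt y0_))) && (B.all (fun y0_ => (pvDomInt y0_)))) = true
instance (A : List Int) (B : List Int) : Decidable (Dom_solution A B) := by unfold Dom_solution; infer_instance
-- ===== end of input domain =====

-- B replaces A's quadratic B.pop(0) loop by an advancing index over the sorted list (O(n log n)).
-- Note: Python A sorts its arguments in place; B does not — the equivalence proved is about the return value.

-- ===== PORT A =====
-- loop 'for a in A': state = (remaining B, answer); 'break' when B is empty returns answer.
def solGoA : List Int → List Int → Int → Int
  | [], _, ans => ans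
  | _ :: _, [], ans => ans
  | a :: as, b :: bs, ans =>
      if b > a then solGoA as bs (ans + 1) else solGoA as (b :: bs) ans

def solution (A : List Int) (B : List Int) : Int :=
  solGoA (PySem.List.sorted A (fun x => x) true) (PySem.List.sorted B (fun x => x) true) 0

-- ===== PORT B =====
-- loop 'for a in sa': 'if j < len(sb) and sb[j] > a: j += 1'; returns final j.
def solGoB : List Int → List Int → Nat → Nat
  | [], _, j => j
  | a :: as, sb, j =>
      match sb[j]? with
      | some b => if b > a then solGoB as sb (j + 1) else solGoB as sb j
      | none => solGoB as sb j

def solution_alt (A : List Int) (B : List Int) : Int :=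
  Int.ofNat (solGoB (PySem.List.sorted A (fun x => x) true)
                    (PySem.List.sorted B (fun x => x) true) 0)

-- ===== PRECONDITION & SPEC =====
def Spec_solution (A : List Int) (B : List Int) (out : Int) : Prop := out = solution_alt A B
instance (A : List Int) (B : List Int) (out : Int) : Decidable (Spec_solution A B out) := by unfold Spec_solution; infer_instance

-- ===== CLAIM (what is proved, stated in full; the proofs are below) =====
def Claim_equal_solution : Prop := ∀ (A : List Int) (B : List Int), Dom_solution A B → Spec_solution A B (solution A B)

-- ===== LEMMAS AND PROOFS =====
theorem solGoB_of_ge (as sb : List Int) (j : Nat) (h : sb.length ≤ j) :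
    solGoB as sb j = j := by
  induction as with
  | nil => rfl
  | cons a as ih =>
      simp only [solGoB]
      rw [List.getElem?_eq_none (by omega)]
      exact ih

theorem solGo_eq (as : List Int) : ∀ (sb : List Int) (j : Nat) (ans : Int),
    solGoA as (sb.drop j) ans = ans + Int.ofNat (solGoB as sb j) - Int.ofNat j := by
  induction as with
  | nil => intro sb j ans; simp [solGoA, solGoB]
  | cons a as ih =>
      intro sb j ans
      by_cases h : j < sb.length
      · rw [List.drop_eq_getElem_cons h]
        simp only [solGoA, solGoB, List.getElem?_eq_getElem h]
        split_ifs with hb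
        · rw [ih sb (j + 1) (ans + 1)]
          simp only [Int.ofNat_eq_natCast]; push_cast; ring
        · rw [← List.drop_eq_getElem_cons h, ih sb j ans]
      · have hlen : sb.length ≤ j := by omega
        rw [List.drop_eq_nil_of_le hlen, solGoB_of_ge (a :: as) sb j hlen]
        simp [solGoA]

-- ===== VERDICT (by name: the statement is the Claim_ definition above) =====
theorem solution_spec : Claim_equal_solution := by
  intro A B _
  show solution A B = solution_alt A B
  unfold solution solution_alt
  have := solGo_eq (PySem.List.sorted A (fun x => x) true)
                   (PySem.List.sorted B (fun x => x) true) 0 0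
  simpa using this
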